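-- pv_equiv track=rewrite | github.com/eliottcassidy2000/math | 04-computation/numthy_arithmetic_23.py | class_number_neg
-- ===== SOURCE A (Python) =====
-- import math
--
-- def class_number_neg(d):
--     """Compute class number h(-|d|) for negative fundamental discriminant."""
--     D = -abs(d)
--     if D >= 0:
--         return 0
--     # Kronecker symbol sum
--     h = 0
--     for a in range(1, abs(D)):
--         # Kronecker symbol (D/a)
--         kr = 0
--         if math.gcd(a, abs(D)) > 1:
--             kr = 0
--         else:
--             kr = pow(D % a if D % a >= 0 else a + (D % a), (a - 1) // 2, a) if a > 2 else 1
--             if kr > a // 2: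
--                 kr -= a
--         h += kr
--     # Simpler: use formula h(-d) = (1/d) sum_{a=1}^{|d|} (D/a) * a... no
--     # Just count reduced forms
--     h_count = 0
--     b_max = int(math.sqrt(abs(D) / 3)) + 1
--     for b in range(0, b_max + 1):
--         if (b * b - D) % 4 != 0 and (b * b + abs(D)) % 4 != 0:
--             # Try both signs
--             pass
--         disc_rem = abs(D) + b * b if D < 0 else b * b - D
--         if disc_rem % 4 != 0:
--             continue
--         four_ac = disc_rem
--         for a in range(max(1, b), int(math.sqrt(four_ac / 4)) + 2):
--             if four_ac % (4 * a) == 0: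
--                 c = four_ac // (4 * a)
--                 if c >= a and a >= b and b >= 0:
--                     if b == 0 or b == a or a == c:
--                         h_count += 1
--                     else:
--                         h_count += 2  # count both +b and -b
--     return h_count
-- ===== SOURCE B (Python) =====
-- import math
--
-- def class_number_neg(d):
--     """Compute class number h(-|d|) for negative fundamental discriminant."""
--     D = -abs(d)
--     if D >= 0:
--         return 0
--     n = abs(D)
--     count = 0
--     for a in range(1, math.isqrt(n // 3) + 2):
--         for b in range(-a + 1, a + 1):
--             if (b * b + n) % (4 * a) == 0:
--                 c = (b * b + n) // (4 * a)
--                 if a <= c and (b >= 0 or a < c):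
--                     count += 1
--     return count
-- ===== Notes on version B (the rewrite author's own statement) =====
-- stated objective: simpler
-- what changed: B drops A's dead Kronecker-symbol loop entirely and counts each reduced form (a,b,c) exactly once by enumerating a outermost and a signed b in (-a, a], instead of A's b-outer enumeration that counts nonnegative b and doubles interior forms.
import Mathlib
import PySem

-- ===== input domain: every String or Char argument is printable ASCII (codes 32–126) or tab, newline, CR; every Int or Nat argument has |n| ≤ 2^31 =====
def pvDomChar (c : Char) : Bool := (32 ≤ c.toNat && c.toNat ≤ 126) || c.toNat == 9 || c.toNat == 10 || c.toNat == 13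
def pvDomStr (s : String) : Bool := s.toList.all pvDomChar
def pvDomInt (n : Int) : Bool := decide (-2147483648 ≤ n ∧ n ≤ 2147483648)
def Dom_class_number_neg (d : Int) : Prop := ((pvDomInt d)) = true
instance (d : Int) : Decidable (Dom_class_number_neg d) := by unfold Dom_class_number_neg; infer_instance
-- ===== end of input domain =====

-- B drops A's dead Kronecker loop and counts each reduced form once via a signed-b enumeration (simpler, and much less work per input).

-- floor of the real square root of a nonnegative integer; ports int(math.sqrt(x)) /
-- math.isqrt(x): exact for the |d| ≤ 2^31 domain, where the correctly-rounded double
-- sqrt of x (or of x/3, x/4) cannot cross an integer threshold.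
def isqrtI (x : Int) : Int := (Nat.sqrt x.toNat : Int)

-- ===== PORT A =====
def class_number_neg (d : Int) : Int :=
  let D : Int := -|d|
  if D ≥ 0 then 0
  else
    -- dead 'Kronecker symbol sum' loop of the source: computed as written, result unused
    let _h : Int :=
      (PySem.List.pyRange 1 |D| 1).foldl (fun h a =>
        let kr : Int :=
          if (Int.gcd a |D| : Nat) > 1 then 0
          else
            let kr : Int :=
              if a > 2 then
                PySem.Int.powMod
                  (if PySem.Int.mod D a ≥ 0 then PySem.Int.mod D a else a + PySem.Int.mod D a)
                  (PySem.Int.floordiv (a - 1) 2).toNat a  -- exponent (a-1)//2 ≥ 0 here, so .toNat is exact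
              else 1
            if kr > PySem.Int.floordiv a 2 then kr - a else kr
        h + kr) 0
    let h_count : Int := 0
    -- int(math.sqrt(abs(D)/3)) = isqrtI (|D| // 3) on the domain
    let b_max : Int := isqrtI (PySem.Int.floordiv |D| 3) + 1
    (PySem.List.pyRange 0 (b_max + 1) 1).foldl (fun h_count b =>
      -- the source's first 'if …: pass' has no effect and is omitted
      let disc_rem : Int := if D < 0 then |D| + b * b else b * b - D
      if PySem.Int.mod disc_rem 4 ≠ 0 then h_count
      else
        let four_ac : Int := disc_rem
        -- int(math.sqrt(four_ac/4)) = isqrtI (four_ac // 4) on the domain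
        (PySem.List.pyRange (max 1 b) (isqrtI (PySem.Int.floordiv four_ac 4) + 2) 1).foldl
          (fun h_count a =>
            if PySem.Int.mod four_ac (4 * a) = 0 then
              let c : Int := PySem.Int.floordiv four_ac (4 * a)
              if c ≥ a ∧ a ≥ b ∧ b ≥ 0 then
                if b = 0 ∨ b = a ∨ a = c then h_count + 1 else h_count + 2
              else h_count
            else h_count) h_count) h_count

-- ===== PORT B =====
def class_number_neg_alt (d : Int) : Int :=
  let D : Int := -|d|
  if D ≥ 0 then 0
  else
    let n : Int := |D|
    (PySem.List.pyRange 1 (isqrtI (PySem.Int.floordiv n 3) + 2) 1).foldl (fun count a =>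
      (PySem.List.pyRange (-a + 1) (a + 1) 1).foldl (fun count b =>
        if PySem.Int.mod (b * b + n) (4 * a) = 0 then
          let c : Int := PySem.Int.floordiv (b * b + n) (4 * a)
          if a ≤ c ∧ (b ≥ 0 ∨ a < c) then count + 1 else count
        else count) count) 0

-- ===== PRECONDITION & SPEC =====
def Spec_class_number_neg (d : Int) (out : Int) : Prop := out = class_number_neg_alt d
instance (d : Int) (out : Int) : Decidable (Spec_class_number_neg d out) := by unfold Spec_class_number_neg; infer_instance

-- ===== CLAIM (what is proved, stated in full; the proofs are below) =====
def Claim_equal_class_number_neg : Prop := ∀ (d : Int), Dom_class_number_neg d → Spec_class_number_neg d (class_number_neg d)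

-- ===== LEMMAS AND PROOFS =====

-- weight A's inner loop adds for the pair (b, a)
def wA (n b a : Int) : Int :=
  if PySem.Int.mod (n + b * b) (4 * a) = 0 then
    if PySem.Int.floordiv (n + b * b) (4 * a) ≥ a ∧ a ≥ b ∧ b ≥ 0 then
      if b = 0 ∨ b = a ∨ a = PySem.Int.floordiv (n + b * b) (4 * a) then 1 else 2
    else 0
  else 0

-- weight B's inner loop adds for the pair (a, b), including the loop-range condition
def wB (n a b : Int) : Int :=
  if (1 - a ≤ b ∧ b ≤ a) ∧ PySem.Int.mod (n + b * b) (4 * a) = 0 ∧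
      a ≤ PySem.Int.floordiv (n + b * b) (4 * a) ∧
      (b ≥ 0 ∨ a < PySem.Int.floordiv (n + b * b) (4 * a)) then 1 else 0

def bmaxI (n : Int) : Int := isqrtI (PySem.Int.floordiv n 3) + 1

-- sum of a mapped pyRange as a Finset sum
theorem sum_map_pyRange (f : Int → Int) (lo hi : Int) :
    ((PySem.List.pyRange lo hi 1).map f).sum = ∑ x ∈ Finset.Icc lo (hi - 1), f x := by
  by_cases h : hi ≤ lo
  · rw [PySem.List.pyRange_one_eq_nil h, Finset.Icc_eq_empty (by omega)]; simp
  · have : hi = lo + ((hi - lo).toNat : Int) := by omega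
    rw [this]
    generalize (hi - lo).toNat = m
    clear this h
    induction m with
    | zero => rw [PySem.List.pyRange_one_eq_nil (by omega), Finset.Icc_eq_empty (by omega)]; simp
    | succ k ih =>
      have h1 : lo + ((k + 1 : Nat) : Int) = (lo + (k : Int)) + 1 := by push_cast; ring
      rw [h1, PySem.List.pyRange_one_succ_right (by omega), List.map_append, List.sum_append]
      have h2 : Finset.Icc lo ((lo + (k : Int)) + 1 - 1) =
          insert (lo + (k : Int)) (Finset.Icc lo (lo + (k : Int) - 1)) := by
        ext x; simp only [Finset.mem_Icc, Finset.mem_insert]; omega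
      rw [h2, Finset.sum_insert (by simp only [Finset.mem_Icc]; omega), ih]
      simp [add_comm]

theorem isqrtI_nonneg (x : Int) : 0 ≤ isqrtI x := by
  unfold isqrtI; exact_mod_cast Nat.zero_le _

theorem isqrtI_le_self (x : Int) (hx : 0 ≤ x) : isqrtI x ≤ x := by
  unfold isqrtI
  have h := Nat.sqrt_le_self x.toNat
  omega

theorem sq_isqrtI_le (x : Int) (hx : 0 ≤ x) : isqrtI x * isqrtI x ≤ x := by
  unfold isqrtI
  have h2 : ((Nat.sqrt x.toNat ^ 2 : Nat) : Int) ≤ ((x.toNat : Nat) : Int) :=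
    Int.ofNat_le.mpr (Nat.sqrt_le' x.toNat)
  push_cast at h2
  rw [pow_two] at h2
  linarith [h2, Int.toNat_of_nonneg hx]

theorem lt_sq_isqrtI_succ (x : Int) : x < (isqrtI x + 1) * (isqrtI x + 1) := by
  unfold isqrtI
  have h2 : ((x.toNat : Nat) : Int) < (((Nat.sqrt x.toNat + 1) ^ 2 : Nat) : Int) :=
    Int.ofNat_lt.mpr (Nat.lt_succ_sqrt' x.toNat)
  push_cast at h2
  rw [pow_two] at h2
  linarith [h2, Int.self_le_toNat x]

theorem le_isqrtI (x m : Int) (hm : 0 ≤ m) (h : m * m ≤ x) : m ≤ isqrtI x := by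
  unfold isqrtI
  have hx : 0 ≤ x := le_trans (mul_nonneg hm hm) h
  have hnat : m.toNat * m.toNat ≤ x.toNat := by
    zify
    rw [Int.toNat_of_nonneg hm, Int.toNat_of_nonneg hx]
    exact h
  have h2 : (m.toNat : Int) ≤ (Nat.sqrt x.toNat : Int) := Int.ofNat_le.mpr (Nat.le_sqrt.mpr hnat)
  omega

-- exact division: floordiv recovers the cofactor when the remainder is zero
theorem floordiv_mul_eq (X y : Int) (_hy : 0 < y) (h : PySem.Int.mod X y = 0) :
    PySem.Int.floordiv X y * y = X := by
  have := PySem.Int.floordiv_mul_add_mod X y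
  omega

-- bound b*b ≤ 3n+7 for 0 ≤ b ≤ bmaxI n
theorem b_sq_bound (n b : Int) (hn : 1 ≤ n) (hb0 : 0 ≤ b) (hb : b ≤ bmaxI n) :
    b * b ≤ 3 * n + 7 := by
  unfold bmaxI at hb
  set s := isqrtI (PySem.Int.floordiv n 3) with hs
  have hs0 : 0 ≤ s := isqrtI_nonneg _
  have hfd : 3 * PySem.Int.floordiv n 3 ≤ n ∧ n - 2 ≤ 3 * PySem.Int.floordiv n 3 := by
    have h1 := PySem.Int.floordiv_mul_add_mod n 3
    have h2 := PySem.Int.mod_nonneg n (b := 3) (by omega)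
    have h3 := PySem.Int.mod_lt n (b := 3) (by omega)
    omega
  have hss : s * s ≤ PySem.Int.floordiv n 3 := sq_isqrtI_le _ (by omega)
  nlinarith [sq_nonneg (s - 1), sq_nonneg (s + 1 - b), hfd.1, hfd.2]

-- any entry of A's inner loop beyond its stated range contributes nothing
theorem wA_eq_zero_of_lt (n b a : Int) (h : a < b) : wA n b a = 0 := by
  unfold wA; split_ifs <;> omega

-- entries beyond A's inner upper bound fail the c ≥ a test
theorem wA_eq_zero_of_big (n b a : Int) (hn : 1 ≤ n) (hb0 : 0 ≤ b)
    (ha : isqrtI (PySem.Int.floordiv (n + b * b) 4) + 1 < a) : wA n b a = 0 := by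
  have hX : 0 ≤ n + b * b := by nlinarith
  set q := PySem.Int.floordiv (n + b * b) 4 with hq
  have hq1 : 4 * q ≤ n + b * b ∧ n + b * b ≤ 4 * q + 3 := by
    have h1 := PySem.Int.floordiv_mul_add_mod (n + b * b) 4
    have h2 := PySem.Int.mod_nonneg (n + b * b) (b := 4) (by omega)
    have h3 := PySem.Int.mod_lt (n + b * b) (b := 4) (by omega)
    omega
  have hsq := lt_sq_isqrtI_succ q
  set sI := isqrtI q with hsI
  have hs0 : 0 ≤ sI := isqrtI_nonneg _
  have hlt : n + b * b < 4 * a * a := by nlinarith [sq_nonneg (a - 1 - (sI + 1))]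
  unfold wA
  split_ifs with h1 h2 h3 <;> try rfl
  all_goals {
    exfalso
    have hc := floordiv_mul_eq (n + b * b) (4 * a) (by omega) h1
    nlinarith [h2.1, h2.2.1] }

-- A's inner loop, as the full-range sum
theorem A_inner (n b acc : Int) (hn : 1 ≤ n) (hb0 : 0 ≤ b) (hb : b ≤ bmaxI n) :
    (PySem.List.pyRange (max 1 b) (isqrtI (PySem.Int.floordiv (n + b * b) 4) + 2) 1).foldl
      (fun h_count a =>
        if PySem.Int.mod (n + b * b) (4 * a) = 0 then
          let c : Int := PySem.Int.floordiv (n + b * b) (4 * a)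
          if c ≥ a ∧ a ≥ b ∧ b ≥ 0 then
            if b = 0 ∨ b = a ∨ a = c then h_count + 1 else h_count + 2
          else h_count
        else h_count) acc
    = acc + ∑ a ∈ Finset.Icc 1 (n + 2), wA n b a := by
  have hbody : (fun (h_count a : Int) =>
      if PySem.Int.mod (n + b * b) (4 * a) = 0 then
        let c : Int := PySem.Int.floordiv (n + b * b) (4 * a)
        if c ≥ a ∧ a ≥ b ∧ b ≥ 0 then
          if b = 0 ∨ b = a ∨ a = c then h_count + 1 else h_count + 2
        else h_count
      else h_count) = fun h_count a => h_count + wA n b a := by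
    funext h a; dsimp only; unfold wA; split_ifs <;> omega
  rw [hbody, PySem.List.foldl_add, sum_map_pyRange]
  congr 1
  rw [show isqrtI (PySem.Int.floordiv (n + b * b) 4) + 2 - 1
      = isqrtI (PySem.Int.floordiv (n + b * b) 4) + 1 from by ring]
  apply Finset.sum_subset
  · intro x hx
    simp only [Finset.mem_Icc] at hx ⊢
    have h1 : isqrtI (PySem.Int.floordiv (n + b * b) 4) ≤ PySem.Int.floordiv (n + b * b) 4 := by
      apply isqrtI_le_self
      have h2 := PySem.Int.floordiv_mul_add_mod (n + b * b) 4
      have h3 := PySem.Int.mod_lt (n + b * b) (b := 4) (by omega)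
      nlinarith
    have h2 : 4 * PySem.Int.floordiv (n + b * b) 4 ≤ n + b * b := by
      have h2 := PySem.Int.floordiv_mul_add_mod (n + b * b) 4
      have h3 := PySem.Int.mod_nonneg (n + b * b) (b := 4) (by omega)
      omega
    have h4 := b_sq_bound n b hn hb0 hb
    omega
  · intro x hx hx'
    simp only [Finset.mem_Icc] at hx hx'
    rcases (by omega : x < max 1 b ∨ isqrtI (PySem.Int.floordiv (n + b * b) 4) + 1 < x) with h | h
    · exact wA_eq_zero_of_lt n b x (by omega)
    · exact wA_eq_zero_of_big n b x hn hb0 h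

-- skipping A's 'continue' needs: an odd n+b*b contributes nothing for any a
theorem wA_eq_zero_of_mod4 (n b a : Int) (h : PySem.Int.mod (n + b * b) 4 ≠ 0) : wA n b a = 0 := by
  unfold wA
  have h4 : ¬ PySem.Int.mod (n + b * b) (4 * a) = 0 := by
    intro hmod
    apply h
    rw [PySem.Int.mod_eq_zero_iff_dvd] at hmod ⊢
    exact dvd_trans (dvd_mul_right 4 a) hmod
  rw [if_neg h4]

-- A's value as a double sum
theorem A_char (d : Int) (hd : d ≠ 0) :
    class_number_neg d =
      ∑ b ∈ Finset.Icc 0 (bmaxI |d|), ∑ a ∈ Finset.Icc 1 (|d| + 2), wA |d| b a := by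
  have hn : (1 : Int) ≤ |d| := Int.one_le_abs hd
  simp only [class_number_neg, abs_neg, abs_abs]
  rw [if_neg (by omega : ¬ -|d| ≥ 0)]
  simp only [show ∀ x y : Int, (if -|d| < 0 then x else y) = x from fun x y => if_pos (by omega)]
  have hcong := PySem.List.foldl_congr_mem
    (l := PySem.List.pyRange 0 (bmaxI |d| + 1) 1) (init := (0 : Int))
    (f := fun (h_count b : Int) =>
      if PySem.Int.mod (|d| + b * b) 4 ≠ 0 then h_count
      else
        (PySem.List.pyRange (max 1 b) (isqrtI (PySem.Int.floordiv (|d| + b * b) 4) + 2) 1).foldl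
          (fun h_count a =>
            if PySem.Int.mod (|d| + b * b) (4 * a) = 0 then
              let c : Int := PySem.Int.floordiv (|d| + b * b) (4 * a)
              if c ≥ a ∧ a ≥ b ∧ b ≥ 0 then
                if b = 0 ∨ b = a ∨ a = c then h_count + 1 else h_count + 2
              else h_count
            else h_count) h_count)
    (g := fun (h_count b : Int) => h_count + ∑ a ∈ Finset.Icc 1 (|d| + 2), wA |d| b a)
    (by
      intro acc b hb
      dsimp only
      rw [PySem.List.mem_pyRange_one] at hb
      by_cases hmod : PySem.Int.mod (|d| + b * b) 4 ≠ 0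
      · rw [if_pos hmod, Finset.sum_eq_zero (fun a _ => wA_eq_zero_of_mod4 |d| b a hmod)]
        ring
      · rw [if_neg hmod]
        exact A_inner |d| b acc hn (by omega) (by omega))
  refine Eq.trans ?_ (congrArg _ rfl)
  unfold bmaxI at hcong
  exact hcong.trans (by
    rw [PySem.List.foldl_add, sum_map_pyRange, zero_add,
      show isqrtI (PySem.Int.floordiv |d| 3) + 1 + 1 - 1 = bmaxI |d| from by unfold bmaxI; ring])

-- B's value as a double sum
theorem B_char (d : Int) (hd : d ≠ 0) :
    class_number_neg_alt d =
      ∑ a ∈ Finset.Icc 1 (bmaxI |d|), ∑ b ∈ Finset.Icc (1 - a) a, wB |d| a b := by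
  have hn : (1 : Int) ≤ |d| := Int.one_le_abs hd
  simp only [class_number_neg_alt, abs_neg, abs_abs]
  rw [if_neg (by omega : ¬ -|d| ≥ 0)]
  have hcong := PySem.List.foldl_congr_mem
    (l := PySem.List.pyRange 1 (isqrtI (PySem.Int.floordiv |d| 3) + 2) 1) (init := (0 : Int))
    (f := fun (count a : Int) =>
      (PySem.List.pyRange (-a + 1) (a + 1) 1).foldl (fun count b =>
        if PySem.Int.mod (b * b + |d|) (4 * a) = 0 then
          let c : Int := PySem.Int.floordiv (b * b + |d|) (4 * a)
          if a ≤ c ∧ (b ≥ 0 ∨ a < c) then count + 1 else count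
        else count) count)
    (g := fun (count a : Int) => count + ∑ b ∈ Finset.Icc (1 - a) a, wB |d| a b)
    (by
      intro acc a ha
      dsimp only
      rw [PySem.List.mem_pyRange_one] at ha
      have hinner := PySem.List.foldl_congr_mem
        (l := PySem.List.pyRange (-a + 1) (a + 1) 1) (init := acc)
        (f := fun (count b : Int) =>
          if PySem.Int.mod (b * b + |d|) (4 * a) = 0 then
            let c : Int := PySem.Int.floordiv (b * b + |d|) (4 * a)
            if a ≤ c ∧ (b ≥ 0 ∨ a < c) then count + 1 else count
          else count)
        (g := fun (count b : Int) => count + wB |d| a b)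
        (by
          intro acc2 b hb
          dsimp only
          rw [PySem.List.mem_pyRange_one] at hb
          rw [show b * b + |d| = |d| + b * b from by ring]
          unfold wB
          split_ifs <;> omega)
      rw [hinner, PySem.List.foldl_add, sum_map_pyRange,
        show (-a + 1) = (1 - a) from by ring, show (a + 1 - 1) = a from by ring])
  rw [hcong, PySem.List.foldl_add, sum_map_pyRange, zero_add,
    show isqrtI (PySem.Int.floordiv |d| 3) + 2 - 1 = bmaxI |d| from by unfold bmaxI; ring]

-- b beyond bmaxI never contributes: a reduced form with b ≤ a ≤ c has 3b² ≤ n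
theorem wA_eq_zero_big_b (n b a : Int) (_hn : 1 ≤ n) (hb : bmaxI n < b) (ha : 1 ≤ a) :
    wA n b a = 0 := by
  have hs0 := isqrtI_nonneg (PySem.Int.floordiv n 3)
  unfold wA
  split_ifs with h1 h2 h3 <;> try rfl
  all_goals {
    exfalso
    have hc := floordiv_mul_eq (n + b * b) (4 * a) (by omega) h1
    have h4 : 4 * a * a ≤ n + b * b := by nlinarith [h2.1]
    have h5 : 3 * (b * b) ≤ n := by nlinarith [h2.2.1, h2.2.2]
    have h6 : b ≤ isqrtI (PySem.Int.floordiv n 3) := by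
      apply le_isqrtI _ b (by omega)
      rw [PySem.Int.le_floordiv_iff_mul_le (by omega)]
      omega
    unfold bmaxI at hb
    omega }

-- B's weight vanishes outside its loop range
theorem wB_eq_zero_out (n a b : Int) (h : b < 1 - a ∨ a < b) : wB n a b = 0 := by
  unfold wB; split_ifs with h1 <;> [omega; rfl]

-- a beyond bmaxI never contributes on B's side either
theorem wB_inner_zero_big_a (n a b : Int) (_hn : 1 ≤ n) (ha : bmaxI n < a)
    (hb1 : 1 - a ≤ b) (hb2 : b ≤ a) : wB n a b = 0 := by
  have hs0 := isqrtI_nonneg (PySem.Int.floordiv n 3)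
  unfold wB
  split_ifs with h1 <;> try rfl
  exfalso
  obtain ⟨-, hmod, hac, -⟩ := h1
  have ha1 : 1 ≤ a := by unfold bmaxI at ha; omega
  have hc := floordiv_mul_eq (n + b * b) (4 * a) (by omega) hmod
  have h4 : 4 * (a * a) ≤ n + b * b := by nlinarith
  have h5 : b * b ≤ a * a := by nlinarith
  have h6 : a ≤ isqrtI (PySem.Int.floordiv n 3) := by
    apply le_isqrtI _ a (by omega)
    rw [PySem.Int.le_floordiv_iff_mul_le (by omega)]
    omega
  unfold bmaxI at ha
  omega

-- the b = 0 column: A counts once, B counts once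
theorem pt0 (n a : Int) (ha : 1 ≤ a) : wA n 0 a = wB n a 0 := by
  unfold wA wB; split_ifs <;> omega

-- a positive b column: A's single entry equals B's +b entry plus B's -b entry
theorem pt1 (n a b : Int) (ha : 1 ≤ a) (hb : 1 ≤ b) :
    wA n b a = wB n a b + wB n a (-b) := by
  unfold wA wB
  simp only [neg_mul_neg]
  split_ifs <;> omega

-- the row of A at a fixed a equals B's inner sum at that a
theorem inner_eq (n a : Int) (_hn : 1 ≤ n) (ha : 1 ≤ a) (_haK : a ≤ n + 2) :
    ∑ b ∈ Finset.Icc 0 (n + 2), wA n b a = ∑ b ∈ Finset.Icc (1 - a) a, wB n a b := by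
  have hsplit : Finset.Icc (1 - a) a = Finset.Icc (1 - a) (-1) ∪ Finset.Icc 0 a := by
    ext x; simp only [Finset.mem_Icc, Finset.mem_union]; omega
  have hdisj : Disjoint (Finset.Icc (1 - a) (-1)) (Finset.Icc 0 a) := by
    rw [Finset.disjoint_left]
    intro x hx hx'
    simp only [Finset.mem_Icc] at hx hx'
    omega
  rw [hsplit, Finset.sum_union hdisj]
  have hneg : ∑ b ∈ Finset.Icc (1 - a) (-1), wB n a b
      = ∑ b ∈ Finset.Icc 1 (a - 1), wB n a (-b) := by
    apply Finset.sum_nbij' (i := fun b => -b) (j := fun b => -b)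
    · intro x hx; simp only [Finset.mem_Icc] at hx ⊢; omega
    · intro x hx; simp only [Finset.mem_Icc] at hx ⊢; omega
    · intro x _; ring
    · intro x _; ring
    · intro x _; rw [neg_neg]
  have hposx : ∑ b ∈ Finset.Icc 0 a, wB n a b = ∑ b ∈ Finset.Icc 0 (n + 2), wB n a b := by
    apply Finset.sum_subset
    · intro x hx; simp only [Finset.mem_Icc] at hx ⊢; omega
    · intro b hb hb'
      simp only [Finset.mem_Icc] at hb hb'
      exact wB_eq_zero_out n a b (by omega)
  have hnegx : ∑ b ∈ Finset.Icc 1 (a - 1), wB n a (-b) = ∑ b ∈ Finset.Icc 1 (n + 2), wB n a (-b) := by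
    apply Finset.sum_subset
    · intro x hx; simp only [Finset.mem_Icc] at hx ⊢; omega
    · intro b hb hb'
      simp only [Finset.mem_Icc] at hb hb'
      exact wB_eq_zero_out n a (-b) (by omega)
  have hins : ∀ (f : Int → Int), ∑ b ∈ Finset.Icc (0 : Int) (n + 2), f b
      = f 0 + ∑ b ∈ Finset.Icc 1 (n + 2), f b := by
    intro f
    rw [show Finset.Icc (0 : Int) (n + 2) = insert 0 (Finset.Icc 1 (n + 2)) from by
      ext x; simp only [Finset.mem_Icc, Finset.mem_insert]; omega]
    rw [Finset.sum_insert (by simp only [Finset.mem_Icc]; omega)]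
  rw [hneg, hposx, hnegx, hins (fun b => wA n b a), hins (wB n a), pt0 n a ha]
  rw [Finset.sum_congr rfl (fun b hb => pt1 n a b ha (by
    simp only [Finset.mem_Icc] at hb; omega)), Finset.sum_add_distrib]
  ring

-- the two double sums agree
theorem sums_eq (n : Int) (hn : 1 ≤ n) :
    ∑ b ∈ Finset.Icc 0 (bmaxI n), ∑ a ∈ Finset.Icc 1 (n + 2), wA n b a =
      ∑ a ∈ Finset.Icc 1 (bmaxI n), ∑ b ∈ Finset.Icc (1 - a) a, wB n a b := by
  have hfd : 3 * PySem.Int.floordiv n 3 ≤ n ∧ n - 2 ≤ 3 * PySem.Int.floordiv n 3 := by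
    have h1 := PySem.Int.floordiv_mul_add_mod n 3
    have h2 := PySem.Int.mod_nonneg n (b := 3) (by omega)
    have h3 := PySem.Int.mod_lt n (b := 3) (by omega)
    omega
  have hsle := isqrtI_le_self (PySem.Int.floordiv n 3) (by omega)
  have hs0 := isqrtI_nonneg (PySem.Int.floordiv n 3)
  have hMK : bmaxI n ≤ n + 2 := by unfold bmaxI; omega
  have hM1 : 1 ≤ bmaxI n := by unfold bmaxI; omega
  calc
    ∑ b ∈ Finset.Icc 0 (bmaxI n), ∑ a ∈ Finset.Icc 1 (n + 2), wA n b a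
        = ∑ b ∈ Finset.Icc 0 (n + 2), ∑ a ∈ Finset.Icc 1 (n + 2), wA n b a := by
          apply Finset.sum_subset
          · intro x hx; simp only [Finset.mem_Icc] at hx ⊢; omega
          · intro b hb hb'
            simp only [Finset.mem_Icc] at hb hb'
            exact Finset.sum_eq_zero fun a ha => by
              simp only [Finset.mem_Icc] at ha
              exact wA_eq_zero_big_b n b a hn (by omega) (by omega)
    _ = ∑ a ∈ Finset.Icc 1 (n + 2), ∑ b ∈ Finset.Icc 0 (n + 2), wA n b a := Finset.sum_comm
    _ = ∑ a ∈ Finset.Icc 1 (n + 2), ∑ b ∈ Finset.Icc (1 - a) a, wB n a b := by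
          apply Finset.sum_congr rfl
          intro a ha
          simp only [Finset.mem_Icc] at ha
          exact inner_eq n a hn ha.1 ha.2
    _ = ∑ a ∈ Finset.Icc 1 (bmaxI n), ∑ b ∈ Finset.Icc (1 - a) a, wB n a b := by
          symm
          apply Finset.sum_subset
          · intro x hx; simp only [Finset.mem_Icc] at hx ⊢; omega
          · intro a ha ha'
            simp only [Finset.mem_Icc] at ha ha'
            exact Finset.sum_eq_zero fun b hb => by
              simp only [Finset.mem_Icc] at hb
              exact wB_inner_zero_big_a n a b hn (by omega) hb.1 hb.2

-- ===== VERDICT (by name: the statement is the Claim_ definition above) =====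
theorem class_number_neg_spec : Claim_equal_class_number_neg := by
  intro d _
  unfold Spec_class_number_neg
  by_cases hd : d = 0
  · subst hd; rfl
  · rw [A_char d hd, B_char d hd, sums_eq |d| (Int.one_le_abs hd)]
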